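-- pv_equiv track=rewrite | github.com/lcy958756276-dev/CEPO_LLM | Benchmark/vllm_server.py | remove_stop_words
-- ===== SOURCE A (Python) =====
-- import copy
--
-- def remove_stop_words(token_ids,stop_words_ids):
--     token_ids=copy.deepcopy(token_ids)
--     while len(token_ids)>0:
--         if token_ids[-1] in stop_words_ids:
--             token_ids.pop(-1)
--         else:
--             break
--     return token_ids
-- ===== SOURCE B (Python) =====
-- def remove_stop_words(token_ids, stop_words_ids):
--     cut = 0
--     for i, t in enumerate(token_ids):
--         if t not in stop_words_ids:
--             cut = i + 1
--     return token_ids[:cut]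
-- ===== Notes on version B (the rewrite author's own statement) =====
-- stated objective: simpler
-- what changed: Replaces deepcopy plus a backward while-loop of pop(-1) calls with a single forward pass that records the index after the last non-stop token and one slice; no mutation of any list.
import Mathlib
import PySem

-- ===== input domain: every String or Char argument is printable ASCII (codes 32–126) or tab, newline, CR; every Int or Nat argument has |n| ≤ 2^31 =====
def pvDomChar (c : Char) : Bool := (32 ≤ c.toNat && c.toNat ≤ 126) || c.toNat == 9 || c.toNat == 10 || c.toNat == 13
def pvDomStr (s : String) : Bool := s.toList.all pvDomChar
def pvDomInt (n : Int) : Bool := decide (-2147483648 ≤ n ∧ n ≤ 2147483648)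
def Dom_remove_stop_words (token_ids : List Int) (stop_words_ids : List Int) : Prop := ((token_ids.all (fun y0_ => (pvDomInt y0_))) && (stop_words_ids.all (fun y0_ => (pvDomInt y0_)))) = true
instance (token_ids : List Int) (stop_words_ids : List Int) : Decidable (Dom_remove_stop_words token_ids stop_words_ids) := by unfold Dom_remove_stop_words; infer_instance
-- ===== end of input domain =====

-- B replaces A's deepcopy + backward pop(-1) while-loop with one forward pass computing the
-- cut index after the last non-stop token, then a single slice (objective: simpler; no mutation).

-- ===== PORT A =====
-- while len(token_ids) > 0: if token_ids[-1] in stop_words_ids: pop(-1) else break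
def removeLoopA (stop_words_ids : List Int) (ts : List Int) : List Int :=
  if _h : 0 < ts.length then
    match ts.getLast? with          -- token_ids[-1], exists since the list is nonempty
    | some t => if t ∈ stop_words_ids then removeLoopA stop_words_ids ts.dropLast else ts
    | none => ts
  else ts
termination_by ts.length
decreasing_by simp [List.length_dropLast]; omega

def remove_stop_words (token_ids : List Int) (stop_words_ids : List Int) : List Int :=
  removeLoopA stop_words_ids token_ids

-- ===== PORT B =====
-- cut = 0; for i, t in enumerate(token_ids): if t not in stop_words_ids: cut = i + 1; return token_ids[:cut]
def remove_stop_words_alt (token_ids : List Int) (stop_words_ids : List Int) : List Int :=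
  let cut : Int := (PySem.List.enumerate token_ids).foldl
    (fun cut p => if p.2 ∈ stop_words_ids then cut else p.1 + 1) 0
  PySem.List.slice token_ids none (some cut)

-- ===== PRECONDITION & SPEC =====
def Spec_remove_stop_words (token_ids : List Int) (stop_words_ids : List Int) (out : List Int) : Prop := out = remove_stop_words_alt token_ids stop_words_ids
instance (token_ids : List Int) (stop_words_ids : List Int) (out : List Int) : Decidable (Spec_remove_stop_words token_ids stop_words_ids out) := by unfold Spec_remove_stop_words; infer_instance

-- ===== CLAIM (what is proved, stated in full; the proofs are below) =====
def Claim_equal_remove_stop_words : Prop := ∀ (token_ids : List Int) (stop_words_ids : List Int), Dom_remove_stop_words token_ids stop_words_ids → Spec_remove_stop_words token_ids stop_words_ids (remove_stop_words token_ids stop_words_ids)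

-- ===== LEMMAS AND PROOFS =====

-- the fold that B computes
def cutF (stop_words_ids : List Int) (ts : List Int) : Int :=
  (PySem.List.enumerate ts).foldl (fun cut p => if p.2 ∈ stop_words_ids then cut else p.1 + 1) 0

theorem cutF_concat (stop : List Int) (ts : List Int) (x : Int) :
    cutF stop (ts ++ [x]) = if x ∈ stop then cutF stop ts else (ts.length : Int) + 1 := by
  simp [cutF, PySem.List.enumerate_append, PySem.List.enumerate_cons]

theorem cutF_bounds (stop : List Int) (ts : List Int) :
    0 ≤ cutF stop ts ∧ cutF stop ts ≤ (ts.length : Int) := by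
  induction ts using List.reverseRecOn with
  | nil => simp [cutF, PySem.List.enumerate_nil]
  | append_singleton ts x ih =>
      rw [cutF_concat]
      split_ifs <;> simp <;> omega

theorem removeLoopA_eq_take (stop : List Int) (ts : List Int) :
    removeLoopA stop ts = ts.take (cutF stop ts).toNat := by
  induction ts using List.reverseRecOn with
  | nil => rw [removeLoopA]; simp
  | append_singleton ts x ih =>
      have hb := cutF_bounds stop ts
      have hlen : 0 < (ts ++ [x]).length := by simp
      rw [removeLoopA, dif_pos hlen, cutF_concat]
      simp only [List.getLast?_concat, List.dropLast_concat]
      by_cases hx : x ∈ stop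
      · rw [if_pos hx, if_pos hx, ih, List.take_append_of_le_length (by omega)]
      · rw [if_neg hx, if_neg hx, List.take_of_length_le (by simp)]

-- ===== VERDICT (by name: the statement is the Claim_ definition above) =====
theorem remove_stop_words_spec : Claim_equal_remove_stop_words := by
  intro token_ids stop_words_ids _
  show remove_stop_words token_ids stop_words_ids = remove_stop_words_alt token_ids stop_words_ids
  have hb := cutF_bounds stop_words_ids token_ids
  rw [remove_stop_words, removeLoopA_eq_take, remove_stop_words_alt]
  show _ = PySem.List.slice token_ids none (some (cutF stop_words_ids token_ids))
  rw [PySem.List.slice_to _ hb.1]
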